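-- pv_equiv track=rewrite | github.com/rengotaku/my-boilerplate | python-web/tests/test_makefile.py | _extract_target_section
-- ===== SOURCE A (Python) =====
-- def _extract_target_section(content: str, target: str) -> str:
--     section: list[str] = []
--     in_section = False
--     for line in content.split("\n"):
--         if line.startswith(f"{target}:"):
--             in_section = True
--             section.append(line)
--             continue
--         if in_section:
--             if (
--                 line.startswith("\t")
--                 or line.startswith("@")
--                 or line.strip() == ""
--             ):
--                 section.append(line)
--             else:
--                 break
--     return "\n".join(section)
-- ===== SOURCE B (Python) =====
-- def _extract_target_section(content: str, target: str) -> str: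
--     prefix = target + ":"
--     lines = content.split("\n")
--     # phase 1: locate the first target line
--     i = 0
--     while i < len(lines) and not lines[i].startswith(prefix):
--         i += 1
--     if i == len(lines):
--         return ""
--     # phase 2: extend past the run of continuation lines
--     j = i + 1
--     while j < len(lines) and (
--         lines[j].startswith(prefix)
--         or lines[j].startswith("\t")
--         or lines[j].startswith("@")
--         or not lines[j].strip()
--     ):
--         j += 1
--     return "\n".join(lines[i:j])
-- ===== Notes on version B (the rewrite author's own statement) =====
-- stated objective: idiomatic
-- what changed: Replaced A's single pass with a mutable in_section flag and break by a two-phase decomposition: first locate the index of the first '{target}:' line, then extend an end index over the run of continuation lines, returning the joined slice.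
import Mathlib
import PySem

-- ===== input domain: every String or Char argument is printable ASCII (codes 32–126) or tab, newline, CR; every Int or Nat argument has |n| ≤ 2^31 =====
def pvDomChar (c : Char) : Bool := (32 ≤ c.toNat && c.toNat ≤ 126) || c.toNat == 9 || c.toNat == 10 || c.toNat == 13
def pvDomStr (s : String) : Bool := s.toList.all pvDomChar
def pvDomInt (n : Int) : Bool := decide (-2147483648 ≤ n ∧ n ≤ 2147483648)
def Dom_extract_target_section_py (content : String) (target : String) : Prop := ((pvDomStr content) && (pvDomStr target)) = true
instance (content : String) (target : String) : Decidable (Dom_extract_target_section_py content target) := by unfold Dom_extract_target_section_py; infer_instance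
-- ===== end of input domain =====

-- B replaces A's single stateful in_section flag loop by a two-phase locate-then-extend index scan (objective: idiomatic decomposition; return value only, no side effects).

-- ===== PORT A =====
-- continuation test of A's inner branch: tab, '@' or blank line
def pvContA (l : String) : Bool :=
  PySem.Str.startswith l "\t" || PySem.Str.startswith l "@" || (PySem.Str.strip l == "")

-- the for-loop over lines with state (section, in_section); returning early models 'break'
def pvLoopA (pre : String) : List String → List String → Bool → List String
  | [], sec, _ => sec
  | l :: ls, sec, ins =>
    if PySem.Str.startswith l pre then pvLoopA pre ls (sec ++ [l]) true
    else if ins then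
      if pvContA l then pvLoopA pre ls (sec ++ [l]) true
      else sec
    else pvLoopA pre ls sec ins

def extract_target_section_py (content : String) (target : String) : String :=
  PySem.Str.join "\n" (pvLoopA (target ++ ":") ((PySem.Str.split? content "\n").getD []) [] false)

-- ===== PORT B =====
-- phase 1: 'while i < len(lines) and not lines[i].startswith(prefix): i += 1' (i counted by recursion on the suffix)
def pvFindB (pre : String) : List String → Nat
  | [] => 0
  | l :: ls => if PySem.Str.startswith l pre then 0 else pvFindB pre ls + 1

-- phase 2: 'while j < len(lines) and <continuation>: j += 1' (run length, counted by recursion on the suffix)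
def pvRunB (pre : String) : List String → Nat
  | [] => 0
  | l :: ls =>
    if PySem.Str.startswith l pre || PySem.Str.startswith l "\t" ||
       PySem.Str.startswith l "@" || (PySem.Str.strip l == "") then pvRunB pre ls + 1
    else 0

def extract_target_section_py_alt (content : String) (target : String) : String :=
  let pre := target ++ ":"
  let lines := (PySem.Str.split? content "\n").getD []
  let i := pvFindB pre lines
  if i == lines.length then ""
  else
    let j := i + 1 + pvRunB pre (lines.drop (i + 1))
    PySem.Str.join "\n" (PySem.List.slice lines (some (i : Int)) (some (j : Int)))

-- ===== PRECONDITION & SPEC =====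
def Spec_extract_target_section_py (content : String) (target : String) (out : String) : Prop := out = extract_target_section_py_alt content target
instance (content : String) (target : String) (out : String) : Decidable (Spec_extract_target_section_py content target out) := by unfold Spec_extract_target_section_py; infer_instance

-- ===== CLAIM (what is proved, stated in full; the proofs are below) =====
def Claim_equal_extract_target_section_py : Prop := ∀ (content : String) (target : String), Dom_extract_target_section_py content target → Spec_extract_target_section_py content target (extract_target_section_py content target)

-- ===== LEMMAS AND PROOFS =====

-- B's run condition is A's start test or-ed with A's continuation test
theorem pvRunB_cond (pre l : String) :
    (PySem.Str.startswith l pre || PySem.Str.startswith l "\t" ||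
     PySem.Str.startswith l "@" || (PySem.Str.strip l == "")) =
    (PySem.Str.startswith l pre || pvContA l) := by
  simp [pvContA, Bool.or_assoc]

-- once in the section, A appends exactly the run of continuation lines counted by pvRunB
theorem pvLoopA_in (pre : String) (ls : List String) (sec : List String) :
    pvLoopA pre ls sec true = sec ++ ls.take (pvRunB pre ls) := by
  induction ls generalizing sec with
  | nil => simp [pvLoopA, pvRunB]
  | cons l ls ih =>
    simp only [pvLoopA, pvRunB, pvRunB_cond]
    by_cases hs : PySem.Str.startswith l pre = true
    · rw [if_pos hs, if_pos (by rw [hs]; simp : (PySem.Str.startswith l pre || pvContA l) = true),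
        ih, List.take_succ_cons, List.append_assoc]
      rfl
    · rw [if_neg hs]
      by_cases hc : pvContA l = true
      · rw [if_pos hc,
          if_pos (by rw [hc]; simp : (PySem.Str.startswith l pre || pvContA l) = true),
          ih, List.take_succ_cons, List.append_assoc]
        rfl
      · rw [if_neg hc,
          if_neg (by rw [Bool.eq_false_iff.mpr hs, Bool.eq_false_iff.mpr hc]; simp :
            ¬ (PySem.Str.startswith l pre || pvContA l) = true)]
        simp

-- main list-level equality between A's loop result and B's locate-then-extend result
theorem pvLoop_eq (pre : String) (ls : List String) :
    pvLoopA pre ls [] false =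
      (if pvFindB pre ls == ls.length then ([] : List String)
       else (ls.drop (pvFindB pre ls)).take (1 + pvRunB pre (ls.drop (pvFindB pre ls + 1)))) := by
  induction ls with
  | nil => simp [pvLoopA, pvFindB]
  | cons l ls ih =>
    simp only [pvLoopA, pvFindB]
    by_cases hs : PySem.Str.startswith l pre = true
    · rw [if_pos hs, if_pos hs, pvLoopA_in]
      have : ((0 : Nat) == (l :: ls).length) = false := by simp
      rw [this]
      simp [Nat.add_comm, List.take_succ_cons]
    · rw [if_neg hs, if_neg hs, if_neg (by simp), ih]
      have hlen : ((pvFindB pre ls + 1 : Nat) == (l :: ls).length) = ((pvFindB pre ls : Nat) == ls.length) := by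
        simp
      rw [hlen]
      by_cases h : ((pvFindB pre ls : Nat) == ls.length) = true
      · rw [if_pos h, if_pos h]
      · rw [if_neg h, if_neg h]
        simp

-- B's slice rewritten as drop/take
theorem alt_unfold (content target : String) :
    extract_target_section_py_alt content target =
      (let pre := target ++ ":"
       let lines := (PySem.Str.split? content "\n").getD []
       if pvFindB pre lines == lines.length then ""
       else PySem.Str.join "\n"
         ((lines.drop (pvFindB pre lines)).take (1 + pvRunB pre (lines.drop (pvFindB pre lines + 1))))) := by
  unfold extract_target_section_py_alt
  by_cases h : (pvFindB (target ++ ":") ((PySem.Str.split? content "\n").getD []) ==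
      ((PySem.Str.split? content "\n").getD []).length) = true
  · simp [h]
  · simp only [h]
    rw [if_neg (by simp), if_neg (by simp), PySem.List.slice_natCast]
    congr 2
    omega

-- ===== VERDICT (by name: the statement is the Claim_ definition above) =====
theorem extract_target_section_py_spec : Claim_equal_extract_target_section_py := by
  intro content target _
  unfold Spec_extract_target_section_py
  rw [alt_unfold]
  unfold extract_target_section_py
  rw [pvLoop_eq]
  by_cases h : (pvFindB (target ++ ":") ((PySem.Str.split? content "\n").getD []) ==
      ((PySem.Str.split? content "\n").getD []).length) = true
  · simp only [h]
    simp [PySem.Str.join]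
  · simp only [h]
    rw [if_neg (by simp), if_neg (by simp)]
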